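-- pv_equiv track=rewrite | github.com/krzyssikora/advent_of_code | aoc_2022/14_regolith_reservoir.py | get_depth_of_fall
-- ===== SOURCE A (Python) =====
-- def get_depth_of_fall(scan, sand_x, sand_y):
--     if sand_x not in scan:
--         return -1  # abyss
--     if sand_y in scan[sand_x]:
--         return False  # no space
--     min_y = min({1000}.union({v for v in scan[sand_x] if v >= sand_y}))
--     if min_y == 1000:
--         return -1
--     if min_y <= sand_y:
--         return False
--     return min_y - 1
-- ===== SOURCE B (Python) =====
-- def get_depth_of_fall(scan, sand_x, sand_y):
--     if sand_x not in scan: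
--         return -1  # abyss
--     s = sorted(scan[sand_x])
--     # binary search for the first blocked cell at depth >= sand_y
--     lo, hi = 0, len(s)
--     while lo < hi:
--         mid = (lo + hi) // 2
--         if s[mid] < sand_y:
--             lo = mid + 1
--         else:
--             hi = mid
--     if lo == len(s):
--         return -1  # nothing blocked at or below sand_y: abyss
--     first = s[lo]
--     if first == sand_y:
--         return False  # no space
--     if first >= 1000:
--         return -1  # beyond the scan's depth bound: abyss
--     return first - 1
-- ===== Notes on version B (the rewrite author's own statement) =====
-- stated objective: alternative
-- what changed: A builds a filtered set comprehension unioned with a {1000} sentinel and takes its min with membership/post checks; B sorts the column once and binary-searches (hand-written bisect_left) for the first blocked y >= sand_y.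
-- outside the precondition, e.g. on get_depth_of_fall({0: [5]}, 0, 5): A returns False, B returns False
import Mathlib
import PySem

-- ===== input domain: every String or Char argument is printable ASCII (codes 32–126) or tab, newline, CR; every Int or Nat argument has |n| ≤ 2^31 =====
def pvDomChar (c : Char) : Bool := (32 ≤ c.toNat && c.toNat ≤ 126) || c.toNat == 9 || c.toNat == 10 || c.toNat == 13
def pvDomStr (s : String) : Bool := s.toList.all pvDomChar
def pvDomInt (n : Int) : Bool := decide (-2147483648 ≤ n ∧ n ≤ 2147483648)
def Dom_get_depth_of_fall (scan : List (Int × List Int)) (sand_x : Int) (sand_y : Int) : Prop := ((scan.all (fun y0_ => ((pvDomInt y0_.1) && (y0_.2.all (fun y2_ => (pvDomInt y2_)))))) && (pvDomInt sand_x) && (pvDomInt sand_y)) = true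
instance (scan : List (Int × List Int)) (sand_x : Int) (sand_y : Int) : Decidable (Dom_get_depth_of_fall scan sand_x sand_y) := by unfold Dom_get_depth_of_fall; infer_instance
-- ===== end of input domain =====

-- B replaces A's set-comprehension + sentinel-set-min scans by sorting the column and
-- binary-searching for the first blocked y ≥ sand_y (objective: alternative algorithm).

-- ===== PORT A =====
def get_depth_of_fall (scan : List (Int × List Int)) (sand_x : Int) (sand_y : Int) : Int :=
  match PySem.Dict.get? (PySem.Dict.mk scan) sand_x with
  | none => -1  -- abyss
  | some col =>
    if sand_y ∈ col then 0  -- Python returns bool False here; excluded by Pre_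
    else
      let s : PySem.Set Int :=
        PySem.Set.union (PySem.Set.ofList [(1000 : Int)])
          (PySem.Set.ofList (col.filter (fun v => sand_y ≤ v)))
      let min_y : Int := (PySem.List.min? s (fun x => x)).getD 1000  -- s always contains 1000, so min? is some
      if min_y = 1000 then -1
      else if min_y ≤ sand_y then 0  -- Python returns bool False here; excluded by Pre_ (in fact unreachable)
      else min_y - 1

-- ===== PORT B =====
-- B's hand-written bisect_left while-loop: first index in [lo, hi) whose entry is ≥ x
def gdofSearch (s : List Int) (x : Int) (lo hi : Nat) : Nat :=
  if h : lo < hi then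
    let mid := (lo + hi) / 2
    if s.getD mid 0 < x then gdofSearch s x (mid + 1) hi  -- mid < hi ≤ len: getD never uses the default
    else gdofSearch s x lo mid
  else lo
termination_by hi - lo
decreasing_by all_goals omega

def get_depth_of_fall_alt (scan : List (Int × List Int)) (sand_x : Int) (sand_y : Int) : Int :=
  match PySem.Dict.get? (PySem.Dict.mk scan) sand_x with
  | none => -1  -- abyss
  | some col =>
    let s := PySem.List.sorted col (fun v => v) false
    let lo := gdofSearch s sand_y 0 s.length
    if lo = s.length then -1  -- nothing blocked at or below sand_y: abyss
    else
      let first := s.getD lo 0  -- lo < len here: getD never uses the default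
      if first = sand_y then 0  -- Python returns bool False here; excluded by Pre_
      else if 1000 ≤ first then -1  -- beyond the scan's depth bound: abyss
      else first - 1

-- ===== PRECONDITION & SPEC =====
-- Pre_ excludes inputs where sand_y itself is blocked in the looked-up column: there the Python A
-- (and B) return the bool False, which is not a value of the declared result type Int.
def Pre_get_depth_of_fall (scan : List (Int × List Int)) (sand_x : Int) (sand_y : Int) : Prop :=
  sand_y ∉ (PySem.Dict.get? (PySem.Dict.mk scan) sand_x).getD []
instance (scan : List (Int × List Int)) (sand_x : Int) (sand_y : Int) : Decidable (Pre_get_depth_of_fall scan sand_x sand_y) := by unfold Pre_get_depth_of_fall; infer_instance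
def pvWitness_get_depth_of_fall : (List (Int × List Int)) × Int × Int := ([(0, [3, 5])], 0, 1)

def Spec_get_depth_of_fall (scan : List (Int × List Int)) (sand_x : Int) (sand_y : Int) (out : Int) : Prop := out = get_depth_of_fall_alt scan sand_x sand_y
instance (scan : List (Int × List Int)) (sand_x : Int) (sand_y : Int) (out : Int) : Decidable (Spec_get_depth_of_fall scan sand_x sand_y out) := by unfold Spec_get_depth_of_fall; infer_instance

-- ===== CLAIM (what is proved, stated in full; the proofs are below) =====
def Claim_equal_get_depth_of_fall : Prop := ∀ (scan : List (Int × List Int)) (sand_x : Int) (sand_y : Int), Dom_get_depth_of_fall scan sand_x sand_y → Pre_get_depth_of_fall scan sand_x sand_y → Spec_get_depth_of_fall scan sand_x sand_y (get_depth_of_fall scan sand_x sand_y)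

-- ===== LEMMAS AND PROOFS =====

-- the binary search returns the first index whose entry is ≥ x (given the split invariant)
theorem gdofSearch_spec (s : List Int) (x : Int)
    (hmono : ∀ p q, p ≤ q → q < s.length → s.getD p 0 ≤ s.getD q 0)
    (lo hi : Nat)
    (hlo : lo ≤ hi) (hhi : hi ≤ s.length)
    (hbelow : ∀ j, j < lo → s.getD j 0 < x)
    (habove : ∀ j, hi ≤ j → j < s.length → x ≤ s.getD j 0) :
    (∀ j, j < gdofSearch s x lo hi → s.getD j 0 < x) ∧
    (∀ j, gdofSearch s x lo hi ≤ j → j < s.length → x ≤ s.getD j 0) ∧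
    gdofSearch s x lo hi ≤ s.length := by
  fun_induction gdofSearch s x lo hi with
  | case1 lo hi h mid hlt ih =>
    exact ih (by omega) hhi
      (fun j hj => by
        by_cases hj' : j < lo
        · exact hbelow j hj'
        · have hle : s.getD j 0 ≤ s.getD mid 0 := hmono j mid (by omega) (by omega)
          omega)
      habove
  | case2 lo hi h mid hge ih =>
    exact ih (by omega) (by omega) hbelow
      (fun j hjm hjl => by
        by_cases hj' : hi ≤ j
        · exact habove j hj' hjl
        · have hle : s.getD mid 0 ≤ s.getD j 0 := hmono mid j hjm hjl
          omega)
  | case3 lo hi h => exact ⟨fun j hj => hbelow j hj, fun j hj hjl => habove j (by omega) hjl, by omega⟩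

theorem get_depth_of_fall_spec : Claim_equal_get_depth_of_fall := by
  intro scan sand_x sand_y _hdom hpre
  unfold Spec_get_depth_of_fall
  unfold get_depth_of_fall get_depth_of_fall_alt
  cases hget : PySem.Dict.get? (PySem.Dict.mk scan) sand_x with
  | none => rfl
  | some col =>
    unfold Pre_get_depth_of_fall at hpre
    rw [hget] at hpre
    simp only [Option.getD_some] at hpre
    simp only []
    rw [if_neg hpre]
    -- the sorted column B searches
    set s : List Int := PySem.List.sorted col (fun v => v) false with hs
    have hmem : ∀ v : Int, v ∈ s ↔ v ∈ col := fun v => by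
      rw [hs]; exact PySem.List.mem_sorted col (fun v => v) false v
    have hmono : ∀ p q, p ≤ q → q < s.length → s.getD p 0 ≤ s.getD q 0 := by
      intro p q hpq hq
      rw [List.getD_eq_getElem s 0 (lt_of_le_of_lt hpq hq), List.getD_eq_getElem s 0 hq]
      simp only [hs]
      exact PySem.List.sorted_id_getElem_mono col hpq (by rw [← hs]; exact hq)
    obtain ⟨hbelow, habove, hrle⟩ :=
      gdofSearch_spec s sand_y hmono 0 s.length (Nat.zero_le _) le_rfl
        (fun j hj => absurd hj (Nat.not_lt_zero j))
        (fun j hj hjl => absurd (lt_of_le_of_lt hj hjl) (lt_irrefl _))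
    set r := gdofSearch s sand_y 0 s.length with hr
    -- the set A minimises over
    set sset : PySem.Set Int :=
      PySem.Set.union (PySem.Set.ofList [(1000 : Int)])
        (PySem.Set.ofList (col.filter (fun v => sand_y ≤ v))) with hss
    have h1000 : (1000 : Int) ∈ sset := by
      rw [hss, PySem.Set.mem_union]
      exact Or.inl (by simp [PySem.Set.mem_ofList])
    have hne : sset ≠ [] := fun h => by simp [h] at h1000
    obtain ⟨m, hm⟩ : ∃ m, PySem.List.min? sset (fun x => x) = some m := by
      cases hmin : PySem.List.min? sset (fun x => x) with
      | none => exact absurd ((PySem.List.min?_eq_none_iff sset (fun x => x)).mp hmin) hne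
      | some m => exact ⟨m, rfl⟩
    have hmem_s : ∀ y : Int, y ∈ sset ↔ y = 1000 ∨ (y ∈ col ∧ sand_y ≤ y) := by
      intro y
      rw [hss, PySem.Set.mem_union]
      simp [PySem.Set.mem_ofList, List.mem_filter]
    have hmMem : m = 1000 ∨ (m ∈ col ∧ sand_y ≤ m) :=
      (hmem_s m).mp (PySem.List.min?_mem hm)
    have hmMin : ∀ y ∈ sset, m ≤ y := fun y hy => PySem.List.min?_isMin hm y hy
    have hm1000 : m ≤ 1000 := hmMin 1000 h1000
    rw [hm, Option.getD_some]
    by_cases hre : r = s.length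
    · -- B: search ran off the end; A: the filtered set is empty, min = 1000
      rw [if_pos hre]
      have hm' : m = 1000 := by
        rcases hmMem with rfl | ⟨hc, hsy⟩
        · rfl
        · exfalso
          obtain ⟨j, hjl, hjv⟩ := List.mem_iff_getElem.mp ((hmem m).mpr hc)
          have := hbelow j (hre ▸ hjl)
          rw [List.getD_eq_getElem s 0 hjl, hjv] at this
          omega
      rw [if_pos hm']
    · -- B: found the first blocked cell `first` at or below sand_y
      rw [if_neg hre]
      have hrlt : r < s.length := lt_of_le_of_ne hrle hre
      set first := s.getD r 0 with hfirst
      have hfmem : first ∈ col := by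
        have : first ∈ s := by
          rw [hfirst, List.getD_eq_getElem s 0 hrlt]
          exact List.getElem_mem hrlt
        exact (hmem first).mp this
      have hfge : sand_y ≤ first := habove r le_rfl hrlt
      have hfne : first ≠ sand_y := fun h => hpre (h ▸ hfmem)
      rw [if_neg hfne]
      have hfmin : ∀ v ∈ col, sand_y ≤ v → first ≤ v := by
        intro v hv hvy
        obtain ⟨j, hjl, hjv⟩ := List.mem_iff_getElem.mp ((hmem v).mpr hv)
        rcases lt_or_ge j r with hj | hj
        · exfalso
          have := hbelow j hj
          rw [List.getD_eq_getElem s 0 hjl, hjv] at this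
          omega
        · have := hmono r j hj hjl
          rw [List.getD_eq_getElem s 0 hjl, hjv] at this
          rw [hfirst]
          exact this
      by_cases hf1000 : (1000 : Int) ≤ first
      · rw [if_pos hf1000]
        have hm' : m = 1000 := by
          rcases hmMem with rfl | ⟨hc, hsy⟩
          · rfl
          · have := hfmin m hc hsy; omega
        rw [if_pos hm']
      · rw [if_neg hf1000]
        have hmfirst : m = first := by
          have h1 : m ≤ first := hmMin first ((hmem_s first).mpr (Or.inr ⟨hfmem, hfge⟩))
          rcases hmMem with rfl | ⟨hc, hsy⟩
          · omega
          · have := hfmin m hc hsy; omega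
        have hmy : sand_y < m := by
          have : first ≠ sand_y := hfne
          omega
        rw [if_neg (by omega : ¬ m = 1000), if_neg (by omega : ¬ m ≤ sand_y)]
        omega
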